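-- pv_equiv track=rewrite | github.com/Conor-Collins/coco_tools | modules/load_exr.py | _get_channel_groups
-- ===== SOURCE A (Python) =====
-- from typing import Tuple, Dict, List, Optional, Union, Any
--
-- def _get_channel_groups(channel_names: List[str]) -> Dict[str, List[str]]:
--     """
--     Group channel names by their prefix (before the dot).
--     Returns a dictionary of groups with their respective channel suffixes.
--     """
--     groups = {}
--
--     for channel in channel_names:
--         # Handle channels with dots (indicating a group)
--         if '.' in channel:
--             prefix, suffix = channel.split('.', 1)
--             if prefix not in groups:
--                 groups[prefix] = []
--             groups[prefix].append(suffix)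
--         else:
--             # For channels without dots, use them as their own group
--             if channel not in groups:
--                 groups[channel] = []
--             groups[channel].append(None)
--
--     return groups
-- ===== SOURCE B (Python) =====
-- from typing import Tuple, Dict, List, Optional, Union, Any
--
-- def _get_channel_groups(channel_names: List[str]) -> Dict[str, List[str]]:
--     """
--     Group channel names by their prefix (before the dot).
--     Staged passes instead of an incremental dict: parse every channel once
--     into a (prefix, suffix) pair, take the prefixes in first-occurrence
--     order, then build each group's full suffix list in one comprehension.
--     """
--     pairs = [tuple(c.split('.', 1)) if '.' in c else (c, None) for c in channel_names]
--     order = dict.fromkeys(p for p, _ in pairs)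
--     return {k: [s for p, s in pairs if p == k] for k in order}
-- ===== Notes on version B (the rewrite author's own statement) =====
-- stated objective: alternative
-- what changed: Replaces A's single incremental dict-building pass (insert-empty-then-append per channel) with staged passes: parse all channels into (prefix, suffix) pairs once, take prefixes in first-occurrence order via dict.fromkeys, then build each group's whole suffix list with one comprehension per prefix.
import Mathlib
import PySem

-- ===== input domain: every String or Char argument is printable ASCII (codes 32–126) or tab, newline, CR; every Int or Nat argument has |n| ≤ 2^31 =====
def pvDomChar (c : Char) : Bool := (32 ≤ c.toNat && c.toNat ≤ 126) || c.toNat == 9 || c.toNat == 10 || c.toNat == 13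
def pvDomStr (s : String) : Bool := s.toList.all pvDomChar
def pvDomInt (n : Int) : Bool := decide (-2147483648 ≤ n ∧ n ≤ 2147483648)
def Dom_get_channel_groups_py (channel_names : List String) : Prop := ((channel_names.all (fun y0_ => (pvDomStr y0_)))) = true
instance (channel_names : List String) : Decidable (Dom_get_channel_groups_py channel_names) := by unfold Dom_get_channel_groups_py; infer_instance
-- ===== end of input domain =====

-- B replaces A's incremental dict pass by staged passes (parse once, prefixes in
-- first-occurrence order, one suffix-collecting scan per prefix); same cost class, no speed claim.

-- shared literal port of the parse expression both Pythons contain: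
-- "channel.split('.', 1) if '.' in channel else (channel, None)"
def pvParseChannel (c : String) : String × Option String :=
  if PySem.Str.isIn "." c then
    match PySem.Str.splitMax? c "." 1 with
    | some (p :: s :: _) => (p, some s)
    | _ => (c, none)  -- unreachable: split('.', 1) with '.' in c yields two parts
  else (c, none)

-- ===== PORT A =====
def get_channel_groups_py (channel_names : List String) : List (String × List (Option String)) :=
  (channel_names.foldl
    (fun groups channel =>
      let pr := pvParseChannel channel
      let groups := if groups.contains pr.1 then groups else groups.insert pr.1 []
      groups.modify pr.1 [] (fun v => v ++ [pr.2]))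
    PySem.Dict.empty).items

-- ===== PORT B =====
def get_channel_groups_py_alt (channel_names : List String) : List (String × List (Option String)) :=
  let pairs := channel_names.map pvParseChannel
  let order := PySem.List.dedup (pairs.map (fun q => q.1))
  order.map (fun k => (k, ((pairs.filter (fun q => q.1 == k)).map (fun q => q.2))))

-- ===== PRECONDITION & SPEC =====
def Spec_get_channel_groups_py (channel_names : List String) (out : List (String × List (Option String))) : Prop := out = get_channel_groups_py_alt channel_names
instance (channel_names : List String) (out : List (String × List (Option String))) : Decidable (Spec_get_channel_groups_py channel_names out) := by unfold Spec_get_channel_groups_py; infer_instance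

-- ===== CLAIM (what is proved, stated in full; the proofs are below) =====
def Claim_equal_get_channel_groups_py : Prop := ∀ (channel_names : List String), Dom_get_channel_groups_py channel_names → Spec_get_channel_groups_py channel_names (get_channel_groups_py channel_names)

-- ===== LEMMAS AND PROOFS =====

-- A's "insert [] if absent, then append" step is exactly Dict.modify with default []
theorem pvStep_eq (g : PySem.Dict String (List (Option String))) (p : String × Option String) :
    (if g.contains p.1 then g else g.insert p.1 []).modify p.1 [] (fun v => v ++ [p.2])
      = g.modify p.1 [] (fun v => v ++ [p.2]) := by
  by_cases h : g.contains p.1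
  · simp [h]
  · rw [if_neg h]
    unfold PySem.Dict.modify
    rw [PySem.Dict.getD_insert_self, PySem.Dict.insert_insert_self,
        PySem.Dict.getD_of_not_contains (h := by simpa using h)]

-- ===== VERDICT (by name: the statement is the Claim_ definition above) =====
theorem get_channel_groups_py_spec : Claim_equal_get_channel_groups_py := by
  intro channel_names _
  unfold Spec_get_channel_groups_py get_channel_groups_py get_channel_groups_py_alt
  simp only []
  have hfold : channel_names.foldl
      (fun groups channel =>
        let pr := pvParseChannel channel
        let groups := if groups.contains pr.1 then groups else groups.insert pr.1 []
        groups.modify pr.1 [] (fun v => v ++ [pr.2]))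
      PySem.Dict.empty
      = (channel_names.map pvParseChannel).foldl
          (fun d p => d.modify p.1 [] (fun v => v ++ [p.2])) PySem.Dict.empty := by
    rw [List.foldl_map]
    congr 1
    funext d p
    exact pvStep_eq d (pvParseChannel p)
  rw [hfold]
  set ps := channel_names.map pvParseChannel with hps
  have hkeys : ((ps.foldl (fun d p => d.modify p.1 [] (fun v => v ++ [p.2]))
      PySem.Dict.empty)).keys = PySem.Set.ofList (ps.map (fun q => q.1)) := by
    rw [PySem.Dict.keys_foldl_modify_key ps (fun q => q.1) [] (fun _ p => (fun v => v ++ [p.2]))]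
    simp [PySem.Dict.keys_empty, PySem.Set.update, PySem.Set.ofList_eq_foldl]
  have hnd : ((ps.foldl (fun d p => d.modify p.1 [] (fun v => v ++ [p.2]))
      PySem.Dict.empty)).keys.Nodup := by
    rw [hkeys]; exact PySem.Set.nodup_ofList _
  rw [PySem.Dict.items_eq_map_keys _ hnd [], hkeys, PySem.List.dedup_eq_ofList]
  apply List.map_congr_left
  intro k _
  rw [PySem.Dict.getD_foldl_modify_append, PySem.Dict.getD_empty]
  simp
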